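-- pv_equiv track=rewrite | github.com/QifanYang-bw/the8puzzle | the8puzzle.py | state_to_hash
-- ===== SOURCE A (Python) =====
-- def state_to_hash(state):
-- 	hashres = 0
-- 	iterfact = 1
-- 	n2 = len(state) * len(state)
-- 	for i in range(len(state)):
-- 		for j in range(len(state)):
-- 			hashres += state[i][j] * iterfact
-- 			iterfact = iterfact * n2
-- 	return hashres
-- ===== SOURCE B (Python) =====
-- def state_to_hash(state):
-- 	n = len(state)
-- 	cells = [row[j] for row in state for j in range(n)]
-- 	hashres = 0
-- 	for x in reversed(cells):
-- 		hashres = hashres * n * n + x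
-- 	return hashres
-- ===== Notes on version B (the rewrite author's own statement) =====
-- stated objective: simpler
-- what changed: Instead of the nested index loops with two accumulators (running hash and a power accumulator iterfact), B first flattens the grid into one list of cells and then does a single Horner pass over that list in reverse, with one accumulator.
import Mathlib
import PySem

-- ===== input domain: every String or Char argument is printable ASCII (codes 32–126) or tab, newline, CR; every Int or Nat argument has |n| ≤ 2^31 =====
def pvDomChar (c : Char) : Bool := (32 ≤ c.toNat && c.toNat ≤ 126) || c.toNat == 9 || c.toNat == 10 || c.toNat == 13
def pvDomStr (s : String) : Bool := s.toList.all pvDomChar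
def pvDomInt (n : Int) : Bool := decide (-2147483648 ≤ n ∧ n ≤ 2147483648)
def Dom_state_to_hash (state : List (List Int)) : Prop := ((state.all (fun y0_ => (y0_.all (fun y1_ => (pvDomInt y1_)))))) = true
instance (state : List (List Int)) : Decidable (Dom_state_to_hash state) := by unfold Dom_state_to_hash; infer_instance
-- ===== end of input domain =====

-- B flattens the grid into one cell list and hashes it with a single reverse Horner pass
-- (simpler: one accumulator and one pass instead of nested index loops with two accumulators).


-- ===== PORT A =====
def state_to_hash (state : List (List Int)) : Int :=
  let n : Int := (state.length : Int)
  let n2 : Int := n * n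
  (List.foldl (fun (p : Int × Int) (i : Int) =>
      List.foldl (fun (q : Int × Int) (j : Int) =>
          (q.1 + PySem.List.pyGetD (PySem.List.pyGetD state i []) j 0 * q.2, q.2 * n2))
        p (PySem.List.pyRange 0 n 1))
    (0, 1) (PySem.List.pyRange 0 n 1)).1

-- ===== PORT B =====
def state_to_hash_alt (state : List (List Int)) : Int :=
  let n : Int := (state.length : Int)
  let cells : List Int :=
    state.flatMap (fun row => (PySem.List.pyRange 0 n 1).map (fun j => PySem.List.pyGetD row j 0))
  List.foldl (fun (h : Int) (x : Int) => h * n * n + x) 0 cells.reverse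

-- ===== PRECONDITION & SPEC =====
-- Pre_ excludes ragged inputs where some row is shorter than the number of rows:
-- there Python A raises IndexError (state[i][j] out of range).
def Pre_state_to_hash (state : List (List Int)) : Prop :=
  ∀ row ∈ state, state.length ≤ row.length
instance (state : List (List Int)) : Decidable (Pre_state_to_hash state) := by
  unfold Pre_state_to_hash; infer_instance

def pvWitness_state_to_hash : List (List Int) := [[1, 2], [3, 0]]

def Spec_state_to_hash (state : List (List Int)) (out : Int) : Prop := out = state_to_hash_alt state
instance (state : List (List Int)) (out : Int) : Decidable (Spec_state_to_hash state out) := by unfold Spec_state_to_hash; infer_instance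

-- ===== CLAIM (what is proved, stated in full; the proofs are below) =====
def Claim_equal_state_to_hash : Prop := ∀ (state : List (List Int)), Dom_state_to_hash state → Pre_state_to_hash state → Spec_state_to_hash state (state_to_hash state)

-- ===== LEMMAS AND PROOFS =====

/-- The power-accumulator fold (A's inner shape) over a value list equals base `h0` plus
`f0` times the Horner fold over the reversed list. -/
theorem powacc_eq_horner (l : List Int) (b : Int) : ∀ (h0 f0 : Int),
    (List.foldl (fun (p : Int × Int) (x : Int) => (p.1 + x * p.2, p.2 * b)) (h0, f0) l).1
      = h0 + f0 * List.foldl (fun (h : Int) (x : Int) => h * b + x) 0 l.reverse := by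
  induction l with
  | nil => intro h0 f0; simp
  | cons x xs ih =>
      intro h0 f0
      rw [List.foldl_cons, List.reverse_cons, List.foldl_append, ih]
      generalize List.foldl (fun (h : Int) (x : Int) => h * b + x) 0 xs.reverse = H
      simp only [List.foldl_cons, List.foldl_nil]
      ring

/-- A's nested power-accumulator folds equal a single Horner fold over the reversed
row-major flattening of the cell values. -/
theorem nested_powacc_eq_horner_flat (r : List Int) (v : Int → Int → Int) (b : Int) :
    (List.foldl (fun (p : Int × Int) (i : Int) =>
        List.foldl (fun (q : Int × Int) (j : Int) => (q.1 + v i j * q.2, q.2 * b)) p r)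
      (0, 1) r).1
    = List.foldl (fun (h : Int) (x : Int) => h * b + x) 0
        (r.flatMap (fun i => r.map (v i))).reverse := by
  have hA : ∀ (p : Int × Int) (i : Int),
      List.foldl (fun (q : Int × Int) (j : Int) => (q.1 + v i j * q.2, q.2 * b)) p r
        = List.foldl (fun (q : Int × Int) (x : Int) => (q.1 + x * q.2, q.2 * b)) p
            (r.map (v i)) := by
    intro p i; rw [List.foldl_map]
  rw [show (List.foldl (fun (p : Int × Int) (i : Int) =>
        List.foldl (fun (q : Int × Int) (j : Int) => (q.1 + v i j * q.2, q.2 * b)) p r)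
      (0, 1) r)
    = List.foldl (fun (q : Int × Int) (x : Int) => (q.1 + x * q.2, q.2 * b)) (0, 1)
        (r.flatMap (fun i => r.map (v i))) from by
      rw [List.foldl_flatMap]; simp only [hA]]
  rw [powacc_eq_horner]; ring

/-- Reading the first `m` entries of `row` by index equals `row.take m`. -/
theorem map_range_getD_take (row : List Int) : ∀ (m : Nat), m ≤ row.length →
    (List.range m).map (fun k => row.getD k 0) = row.take m := by
  induction row with
  | nil =>
      intro m hm
      have h0 : m = 0 := Nat.le_zero.mp (by simpa using hm)
      subst h0; simp
  | cons a tl ih =>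
      intro m hm
      cases m with
      | zero => simp
      | succ m' =>
          rw [List.range_succ_eq_map, List.map_cons, List.map_map]
          simp only [List.getD_cons_zero, Function.comp_def, List.getD_cons_succ,
            List.take_succ_cons]
          rw [ih m' (by simpa using hm)]

/-- Indexing a list over `range` of its length equals mapping over the list itself. -/
theorem map_range_getD_map {A B : Type} (f : A -> B) (d : A) :
    ∀ (s : List A), (List.range s.length).map (fun k => f (s.getD k d)) = s.map f := by
  intro s
  induction s with
  | nil => simp
  | cons a tl ih =>
      rw [List.length_cons, List.range_succ_eq_map, List.map_cons, List.map_map]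
      simp only [List.getD_cons_zero, Function.comp_def, List.getD_cons_succ, List.map_cons]
      rw [ih]

/-- Taking the first `n` cells of each row via indices equals mapping over the rows. -/
theorem map_range_getD_take_flatten_bridge (state : List (List Int)) :
    (List.range state.length).map (fun k => (state.getD k []).take state.length)
      = state.map (fun row => row.take state.length) := by
  exact map_range_getD_map (fun row => row.take state.length) [] state

/-- Under Pre_, the doubly-indexed cell list of A equals B's flattened cell list. -/
theorem flat_cells_eq (state : List (List Int)) (hpre : Pre_state_to_hash state) :
    (PySem.List.pyRange 0 (state.length : Int) 1).flatMap
        (fun i => (PySem.List.pyRange 0 (state.length : Int) 1).map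
          (fun j => PySem.List.pyGetD (PySem.List.pyGetD state i []) j 0))
      = state.flatMap (fun row =>
          (PySem.List.pyRange 0 (state.length : Int) 1).map
            (fun j => PySem.List.pyGetD row j 0)) := by
  have hr : PySem.List.pyRange 0 (state.length : Int) 1
      = (List.range state.length).map (fun (k : Nat) => (k : Int)) := by
    rw [PySem.List.pyRange_one]
    have h0 : (((state.length : Int)) - 0).toNat = state.length := by simp
    rw [h0]
    exact List.map_congr_left (fun k _ => by omega)
  have hinner : ∀ k ∈ List.range state.length,
      (fun i => ((List.range state.length).map (fun (k : Nat) => (k : Int))).map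
          (fun j => PySem.List.pyGetD (PySem.List.pyGetD state i []) j 0)) ((k : Int))
        = (state.getD k []).take state.length := by
    intro k hk
    have hk' : k < state.length := List.mem_range.mp hk
    simp only [List.map_map]
    simp only [Function.comp_def, PySem.List.pyGetD_natCast]
    refine map_range_getD_take (state.getD k []) state.length ?_
    have hmem : state.getD k [] ∈ state := by
      rw [List.getD_eq_getElem state [] hk']
      exact List.getElem_mem hk'
    exact hpre _ hmem
  have hrow : ∀ row ∈ state,
      ((List.range state.length).map (fun (k : Nat) => (k : Int))).map
          (fun j => PySem.List.pyGetD row j 0)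
        = row.take state.length := by
    intro row hm
    rw [List.map_map]
    simp only [Function.comp_def, PySem.List.pyGetD_natCast]
    exact map_range_getD_take row state.length (hpre row hm)
  rw [hr, List.flatMap_map, List.flatMap_def, List.map_congr_left hinner,
    map_range_getD_take_flatten_bridge state, List.flatMap_def, List.map_congr_left hrow]

-- ===== VERDICT (by name: the statement is the Claim_ definition above) =====
theorem state_to_hash_spec : Claim_equal_state_to_hash := by
  intro state _ hpre
  unfold Spec_state_to_hash state_to_hash state_to_hash_alt
  rw [nested_powacc_eq_horner_flat, flat_cells_eq state hpre]
  have : (fun (h : Int) (x : Int) => h * ((state.length : Int) * (state.length : Int)) + x)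
      = fun (h : Int) (x : Int) => h * (state.length : Int) * (state.length : Int) + x := by
    funext h x; ring
  rw [this]
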